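-- pv_equiv track=rewrite | github.com/tom-wagner/ip | grid.py | solution
-- ===== SOURCE A (Python) =====
-- def solution(U, L, C):
--     # write your code in Python 3.6
--     if sum(C) != U + L:
--         return 'IMPOSSIBLE'
--     row_one_sum = row_two_sum = 0
--     matrix = [[0 for _ in C] for _ in range(0, 2)]
--     for i, row in enumerate(matrix):
--         for j, val in enumerate(row):
--             if C[j] == 2:
--                 matrix[i][j] = 1
--                 if i == 0:
--                     row_one_sum += 1
--                 elif i == 1:
--                     row_two_sum += 1
--             elif i == 0 and row_one_sum < U and C[j] == 1:
--                 matrix[i][j] = 1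
--                 row_one_sum += 1
--             elif i == 1 and row_two_sum < L and matrix[i - 1][j] == 0 and C[j] == 1:
--                 matrix[i][j] = 1
--                 row_two_sum += 1
--     arr_of_strings = [''.join(map(str, row)) for row in matrix]
--     return ','.join(arr_of_strings)
-- ===== SOURCE B (Python) =====
-- def solution(U, L, C):
--     # Single pass over the columns: maintain the two row counters and build
--     # both row strings directly, instead of filling a 2xn matrix row by row.
--     if sum(C) != U + L:
--         return 'IMPOSSIBLE'
--     top_count = bot_count = 0
--     top = []
--     bot = []
--     for c in C:
--         if c == 2:
--             top.append('1')
--             bot.append('1')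
--             top_count += 1
--             bot_count += 1
--         elif c == 1:
--             if top_count < U:
--                 top.append('1')
--                 bot.append('0')
--                 top_count += 1
--             elif bot_count < L:
--                 top.append('0')
--                 bot.append('1')
--                 bot_count += 1
--             else:
--                 top.append('0')
--                 bot.append('0')
--         else:
--             top.append('0')
--             bot.append('0')
--     return ''.join(top) + ',' + ''.join(bot)
-- ===== Notes on version B (the rewrite author's own statement) =====
-- stated objective: simpler
-- what changed: Replaces the 2xn matrix filled by a nested row-major double loop (second row re-reading the first) with a single pass over the columns that maintains two counters and builds both row strings directly.
import Mathlib
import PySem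

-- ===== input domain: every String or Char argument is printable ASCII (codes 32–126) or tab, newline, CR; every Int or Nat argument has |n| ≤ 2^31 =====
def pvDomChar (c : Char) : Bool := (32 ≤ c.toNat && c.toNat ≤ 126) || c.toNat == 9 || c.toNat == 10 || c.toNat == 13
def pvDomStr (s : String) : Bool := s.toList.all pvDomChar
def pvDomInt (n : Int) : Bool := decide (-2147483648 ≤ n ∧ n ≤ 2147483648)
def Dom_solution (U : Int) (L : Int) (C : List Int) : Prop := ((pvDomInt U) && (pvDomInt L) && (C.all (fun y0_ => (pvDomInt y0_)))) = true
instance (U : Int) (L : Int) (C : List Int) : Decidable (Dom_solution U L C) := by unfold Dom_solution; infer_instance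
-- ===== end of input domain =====

-- B replaces A's 2xn matrix filled by a nested row-major double loop with one pass
-- over the columns building both row strings directly (objective: simpler).

-- ===== PORT A =====
-- matrix[i][j] = 1  (rows all have length len(C), which never changes)
def pvSetCell (m : List (List Int)) (i j : Nat) (v : Int) : List (List Int) :=
  m.set i ((m.getD i []).set j v)

-- one iteration of the inner 'for j, val in enumerate(row)' body, at outer index i
def pvStepA (U L : Int) (C : List Int) (i : Nat)
    (st : List (List Int) × Int × Int) (j : Nat) : List (List Int) × Int × Int :=
  let m := st.1
  let s1 := st.2.1
  let s2 := st.2.2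
  let cj := C.getD j 0
  if cj = 2 then
    (pvSetCell m i j 1, if i = 0 then s1 + 1 else s1, if i = 1 then s2 + 1 else s2)
  else if i = 0 ∧ s1 < U ∧ cj = 1 then
    (pvSetCell m i j 1, s1 + 1, s2)
  else if i = 1 ∧ s2 < L ∧ (m.getD (i - 1) []).getD j 0 = 0 ∧ cj = 1 then
    (pvSetCell m i j 1, s1, s2 + 1)
  else
    st

def solution (U : Int) (L : Int) (C : List Int) : String :=
  if C.sum ≠ U + L then "IMPOSSIBLE"
  else
    let n := C.length   -- each row of the matrix has length len(C)
    let matrix0 : List (List Int) := List.replicate 2 (List.replicate n (0 : Int))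
    let st := (List.range 2).foldl
      (fun st i => (List.range n).foldl (pvStepA U L C i) st) (matrix0, 0, 0)
    PySem.Str.join "," (st.1.map (fun row => PySem.Str.join "" (row.map PySem.Int.toStr)))

-- ===== PORT B =====
-- one iteration of the 'for c in C' body of Source B; state (top_count, bot_count, top, bot)
def pvStepB (U L : Int) (st : Int × Int × List Char × List Char) (c : Int) :
    Int × Int × List Char × List Char :=
  let s1 := st.1
  let s2 := st.2.1
  let top := st.2.2.1
  let bot := st.2.2.2
  if c = 2 then (s1 + 1, s2 + 1, top ++ ['1'], bot ++ ['1'])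
  else if c = 1 then
    if s1 < U then (s1 + 1, s2, top ++ ['1'], bot ++ ['0'])
    else if s2 < L then (s1, s2 + 1, top ++ ['0'], bot ++ ['1'])
    else (s1, s2, top ++ ['0'], bot ++ ['0'])
  else (s1, s2, top ++ ['0'], bot ++ ['0'])

def solution_alt (U : Int) (L : Int) (C : List Int) : String :=
  if C.sum ≠ U + L then "IMPOSSIBLE"
  else
    let st := C.foldl (pvStepB U L) (0, 0, [], [])
    String.ofList st.2.2.1 ++ "," ++ String.ofList st.2.2.2

-- ===== PRECONDITION & SPEC =====
def Spec_solution (U : Int) (L : Int) (C : List Int) (out : String) : Prop := out = solution_alt U L C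
instance (U : Int) (L : Int) (C : List Int) (out : String) : Decidable (Spec_solution U L C out) := by unfold Spec_solution; infer_instance

-- ===== CLAIM (what is proved, stated in full; the proofs are below) =====
def Claim_equal_solution : Prop := ∀ (U : Int) (L : Int) (C : List Int), Dom_solution U L C → Spec_solution U L C (solution U L C)

-- ===== LEMMAS AND PROOFS =====

-- top row of A's matrix after the i = 0 pass (and the final row_one_sum)
def pvTopF (U : Int) : Int → List Int → List Int × Int
  | s1, [] => ([], s1)
  | s1, c :: cs =>
    if c = 2 then
      let p := pvTopF U (s1 + 1) cs; (1 :: p.1, p.2)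
    else if s1 < U ∧ c = 1 then
      let p := pvTopF U (s1 + 1) cs; (1 :: p.1, p.2)
    else
      let p := pvTopF U s1 cs; (0 :: p.1, p.2)

-- bottom row of A's matrix after the i = 1 pass, reading the (final) top row r
def pvBotF (L : Int) : Int → List Int → List Int → List Int × Int
  | s2, [], _ => ([], s2)
  | s2, c :: cs, r =>
    if c = 2 then
      let p := pvBotF L (s2 + 1) cs r.tail; (1 :: p.1, p.2)
    else if s2 < L ∧ r.headD 0 = 0 ∧ c = 1 then
      let p := pvBotF L (s2 + 1) cs r.tail; (1 :: p.1, p.2)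
    else
      let p := pvBotF L s2 cs r.tail; (0 :: p.1, p.2)

-- the two digit rows as B computes them, in one pass
def pvPairF (U L : Int) : Int → Int → List Int → List Int × List Int
  | _, _, [] => ([], [])
  | s1, s2, c :: cs =>
    if c = 2 then
      let p := pvPairF U L (s1 + 1) (s2 + 1) cs; (1 :: p.1, 1 :: p.2)
    else if c = 1 then
      if s1 < U then let p := pvPairF U L (s1 + 1) s2 cs; (1 :: p.1, 0 :: p.2)
      else if s2 < L then let p := pvPairF U L s1 (s2 + 1) cs; (0 :: p.1, 1 :: p.2)
      else let p := pvPairF U L s1 s2 cs; (0 :: p.1, 0 :: p.2)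
    else let p := pvPairF U L s1 s2 cs; (0 :: p.1, 0 :: p.2)

def pvCh (d : Int) : Char := if d = 1 then '1' else '0'

theorem pvSet_append (pre : List Int) (x v : Int) (t : List Int) :
    (pre ++ x :: t).set pre.length v = pre ++ v :: t := by
  induction pre with
  | nil => simp
  | cons a p ih => simp [ih]

theorem pvDropGet (C : List Int) (k : Nat) (c : Int) (cs : List Int)
    (h : C.drop k = c :: cs) : C[k]? = some c := by
  have h0 : (C.drop k)[0]? = some c := by rw [h]; rfl
  simpa using h0

theorem pvDropSucc (C : List Int) (k : Nat) (c : Int) (cs : List Int)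
    (h : C.drop k = c :: cs) : C.drop (k + 1) = cs := by
  rw [← List.drop_drop, List.drop_one, h]
  rfl

-- the i = 0 pass fills the top row according to pvTopF and leaves row 1 and s2 alone
theorem pvRow0 (U L : Int) (C : List Int) :
    ∀ (cs : List Int) (k : Nat) (s1 s2 : Int) (pre r1 : List Int), pre.length = k → C.drop k = cs →
    (List.range' k cs.length).foldl (pvStepA U L C 0)
        ([pre ++ List.replicate cs.length 0, r1], s1, s2)
      = ([pre ++ (pvTopF U s1 cs).1, r1], (pvTopF U s1 cs).2, s2) := by
  intro cs
  induction cs with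
  | nil => intro k s1 s2 pre r1 hk hd; simp [pvTopF]
  | cons c cs ih =>
    intro k s1 s2 pre r1 hk hd
    have hget : C[k]? = some c := pvDropGet C k c cs hd
    have hdrop : C.drop (k + 1) = cs := pvDropSucc C k c cs hd
    have hrange : List.range' k (c :: cs).length = k :: List.range' (k + 1) cs.length := by
      simp [List.range']
    rw [hrange]
    simp only [List.foldl_cons]
    have hrep : List.replicate (c :: cs).length (0 : Int) = 0 :: List.replicate cs.length 0 := rfl
    rw [hrep]
    have hset : (pre ++ 0 :: List.replicate cs.length 0).set k 1 = pre ++ 1 :: List.replicate cs.length 0 := by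
      rw [← hk]; exact pvSet_append pre 0 1 _
    by_cases h2 : c = 2
    · have hstep : pvStepA U L C 0 ([pre ++ 0 :: List.replicate cs.length 0, r1], s1, s2) k
          = ([(pre ++ [1]) ++ List.replicate cs.length 0, r1], s1 + 1, s2) := by
        simp [pvStepA, pvSetCell, List.getD, hget, h2, hset]
      rw [hstep, ih (k + 1) (s1 + 1) s2 (pre ++ [1]) r1 (by simp [hk]) hdrop]
      simp [pvTopF, h2]
    · by_cases h1 : s1 < U ∧ c = 1
      · have hstep : pvStepA U L C 0 ([pre ++ 0 :: List.replicate cs.length 0, r1], s1, s2) k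
            = ([(pre ++ [1]) ++ List.replicate cs.length 0, r1], s1 + 1, s2) := by
          simp [pvStepA, pvSetCell, List.getD, hget, h1.1, h1.2, hset]
        rw [hstep, ih (k + 1) (s1 + 1) s2 (pre ++ [1]) r1 (by simp [hk]) hdrop]
        simp [pvTopF, h1]
      · have hstep : pvStepA U L C 0 ([pre ++ 0 :: List.replicate cs.length 0, r1], s1, s2) k
            = ([(pre ++ [0]) ++ List.replicate cs.length 0, r1], s1, s2) := by
          simp [pvStepA, pvSetCell, List.getD, hget, h2]
          tauto
        rw [hstep, ih (k + 1) s1 s2 (pre ++ [0]) r1 (by simp [hk]) hdrop]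
        simp [pvTopF, h2, h1]

-- the i = 1 pass fills the bottom row according to pvBotF, reading the fixed top row r0
set_option maxRecDepth 4000 in
theorem pvRow1 (U L : Int) (C : List Int) (r0 : List Int) :
    ∀ (cs : List Int) (k : Nat) (s1 s2 : Int) (pre : List Int), pre.length = k → C.drop k = cs →
    (List.range' k cs.length).foldl (pvStepA U L C 1)
        ([r0, pre ++ List.replicate cs.length 0], s1, s2)
      = ([r0, pre ++ (pvBotF L s2 cs (r0.drop k)).1], s1, (pvBotF L s2 cs (r0.drop k)).2) := by
  intro cs
  induction cs with
  | nil => intro k s1 s2 pre hk hd; simp [pvBotF]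
  | cons c cs ih =>
    intro k s1 s2 pre hk hd
    have hget : C[k]? = some c := pvDropGet C k c cs hd
    have hdrop : C.drop (k + 1) = cs := pvDropSucc C k c cs hd
    have hr0get : r0[k]?.getD 0 = (r0.drop k).headD 0 := by
      simp [List.head?_eq_getElem?]
    have hr0tail : r0.drop (k + 1) = (r0.drop k).tail := by
      rw [← List.drop_drop, List.drop_one]
    have hrange : List.range' k (c :: cs).length = k :: List.range' (k + 1) cs.length := by
      simp [List.range']
    rw [hrange]
    simp only [List.foldl_cons]
    have hrep : List.replicate (c :: cs).length (0 : Int) = 0 :: List.replicate cs.length 0 := rfl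
    rw [hrep]
    have hset : (pre ++ 0 :: List.replicate cs.length 0).set k 1 = pre ++ 1 :: List.replicate cs.length 0 := by
      rw [← hk]; exact pvSet_append pre 0 1 _
    by_cases h2 : c = 2
    · have hstep : pvStepA U L C 1 ([r0, pre ++ 0 :: List.replicate cs.length 0], s1, s2) k
          = ([r0, (pre ++ [1]) ++ List.replicate cs.length 0], s1, s2 + 1) := by
        simp [pvStepA, pvSetCell, List.getD, hget, h2, hset]
      rw [hstep, ih (k + 1) s1 (s2 + 1) (pre ++ [1]) (by simp [hk]) hdrop]
      have hb : (pvBotF L s2 (c :: cs) (r0.drop k)) =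
          ((1 :: (pvBotF L (s2 + 1) cs (r0.drop k).tail).1, (pvBotF L (s2 + 1) cs (r0.drop k).tail).2)) := by
        simp only [pvBotF]
        rw [if_pos h2]
      rw [hb, hr0tail]
      simp
    · by_cases h1 : s2 < L ∧ (r0.drop k).headD 0 = 0 ∧ c = 1
      · have hstep : pvStepA U L C 1 ([r0, pre ++ 0 :: List.replicate cs.length 0], s1, s2) k
            = ([r0, (pre ++ [1]) ++ List.replicate cs.length 0], s1, s2 + 1) := by
          have hr00 : r0[k]?.getD 0 = 0 := by rw [hr0get]; exact h1.2.1
          simp [pvStepA, pvSetCell, List.getD, hget, hr00, h1.1, h1.2.2, hset]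
        rw [hstep, ih (k + 1) s1 (s2 + 1) (pre ++ [1]) (by simp [hk]) hdrop]
        have hb : (pvBotF L s2 (c :: cs) (r0.drop k)) =
            ((1 :: (pvBotF L (s2 + 1) cs (r0.drop k).tail).1, (pvBotF L (s2 + 1) cs (r0.drop k).tail).2)) := by
          simp only [pvBotF]
          rw [if_neg h2, if_pos h1]
        rw [hb, hr0tail]
        simp
      · have hstep : pvStepA U L C 1 ([r0, pre ++ 0 :: List.replicate cs.length 0], s1, s2) k
            = ([r0, (pre ++ [0]) ++ List.replicate cs.length 0], s1, s2) := by
          have hcond : ¬ (s2 < L ∧ r0[k]?.getD 0 = 0 ∧ c = 1) := by rw [hr0get]; tauto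
          simp [pvStepA, pvSetCell, List.getD, hget, h2, hcond]
        rw [hstep, ih (k + 1) s1 s2 (pre ++ [0]) (by simp [hk]) hdrop]
        have hb : (pvBotF L s2 (c :: cs) (r0.drop k)) =
            ((0 :: (pvBotF L s2 cs (r0.drop k).tail).1, (pvBotF L s2 cs (r0.drop k).tail).2)) := by
          simp only [pvBotF]
          rw [if_neg h2, if_neg h1]
        rw [hb, hr0tail]
        simp

-- B's fold appends exactly the pvPairF rows (as characters)
theorem pvFoldB (U L : Int) :
    ∀ (cs : List Int) (s1 s2 : Int) (top bot : List Char), ∃ s1' s2',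
    cs.foldl (pvStepB U L) (s1, s2, top, bot)
      = (s1', s2', top ++ (pvPairF U L s1 s2 cs).1.map pvCh, bot ++ (pvPairF U L s1 s2 cs).2.map pvCh) := by
  intro cs
  induction cs with
  | nil => intro s1 s2 top bot; exact ⟨s1, s2, by simp [pvPairF]⟩
  | cons c cs ih =>
    intro s1 s2 top bot
    by_cases h2 : c = 2
    · obtain ⟨a, b, hab⟩ := ih (s1 + 1) (s2 + 1) (top ++ ['1']) (bot ++ ['1'])
      exact ⟨a, b, by simp [pvStepB, h2, hab, pvPairF, pvCh]⟩
    · by_cases h1 : c = 1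
      · by_cases hU : s1 < U
        · obtain ⟨a, b, hab⟩ := ih (s1 + 1) s2 (top ++ ['1']) (bot ++ ['0'])
          exact ⟨a, b, by simp [pvStepB, h1, hU, hab, pvPairF, pvCh]⟩
        · by_cases hL : s2 < L
          · obtain ⟨a, b, hab⟩ := ih s1 (s2 + 1) (top ++ ['0']) (bot ++ ['1'])
            exact ⟨a, b, by simp [pvStepB, h1, hU, hL, hab, pvPairF, pvCh]⟩
          · obtain ⟨a, b, hab⟩ := ih s1 s2 (top ++ ['0']) (bot ++ ['0'])
            exact ⟨a, b, by simp [pvStepB, h1, hU, hL, hab, pvPairF, pvCh]⟩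
      · obtain ⟨a, b, hab⟩ := ih s1 s2 (top ++ ['0']) (bot ++ ['0'])
        exact ⟨a, b, by simp [pvStepB, h2, h1, hab, pvPairF, pvCh]⟩

-- the one-pass rows equal A's two-pass rows
theorem pvPair_eq (U L : Int) :
    ∀ (cs : List Int) (s1 s2 : Int),
    (pvPairF U L s1 s2 cs).1 = (pvTopF U s1 cs).1 ∧
    (pvPairF U L s1 s2 cs).2 = (pvBotF L s2 cs (pvTopF U s1 cs).1).1 := by
  intro cs
  induction cs with
  | nil => intro s1 s2; simp [pvPairF, pvTopF, pvBotF]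
  | cons c cs ih =>
    intro s1 s2
    by_cases h2 : c = 2
    · have := ih (s1 + 1) (s2 + 1)
      simp [pvPairF, pvTopF, pvBotF, h2, this.1, this.2]
    · by_cases h1 : c = 1
      · by_cases hU : s1 < U
        · have := ih (s1 + 1) s2
          simp [pvPairF, pvTopF, pvBotF, h1, hU, this.1, this.2]
        · by_cases hL : s2 < L
          · have := ih s1 (s2 + 1)
            simp [pvPairF, pvTopF, pvBotF, h1, hU, hL, this.1, this.2]
          · have := ih s1 s2
            simp [pvPairF, pvTopF, pvBotF, h1, hU, hL, this.1, this.2]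
      · have := ih s1 s2
        simp [pvPairF, pvTopF, pvBotF, h2, h1, this.1, this.2]

theorem pvTop_digits (U : Int) :
    ∀ (cs : List Int) (s1 : Int), ∀ x ∈ (pvTopF U s1 cs).1, x = 0 ∨ x = 1 := by
  intro cs
  induction cs with
  | nil => intro s1 x hx; simp [pvTopF] at hx
  | cons c cs ih =>
    intro s1 x hx
    by_cases h2 : c = 2
    · simp [pvTopF, h2] at hx
      rcases hx with h | h
      · right; exact h
      · exact ih _ x h
    · by_cases h1 : s1 < U ∧ c = 1
      · simp [pvTopF, h1] at hx
        rcases hx with h | h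
        · right; exact h
        · exact ih _ x h
      · simp [pvTopF, h2, h1] at hx
        rcases hx with h | h
        · left; exact h
        · exact ih _ x h

theorem pvBot_digits (L : Int) :
    ∀ (cs : List Int) (s2 : Int) (r : List Int), ∀ x ∈ (pvBotF L s2 cs r).1, x = 0 ∨ x = 1 := by
  intro cs
  induction cs with
  | nil => intro s2 r x hx; simp [pvBotF] at hx
  | cons c cs ih =>
    intro s2 r x hx
    by_cases h2 : c = 2
    · have hb : ((pvBotF L s2 (c :: cs) r).1 : List Int) = 1 :: (pvBotF L (s2 + 1) cs r.tail).1 := by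
        simp only [pvBotF]
        rw [if_pos h2]
      rw [hb] at hx
      rcases List.mem_cons.mp hx with h | h
      · right; exact h
      · exact ih _ _ x h
    · by_cases h1 : s2 < L ∧ r.headD 0 = 0 ∧ c = 1
      · have hb : ((pvBotF L s2 (c :: cs) r).1 : List Int) = 1 :: (pvBotF L (s2 + 1) cs r.tail).1 := by
          simp only [pvBotF]
          rw [if_neg h2, if_pos h1]
        rw [hb] at hx
        rcases List.mem_cons.mp hx with h | h
        · right; exact h
        · exact ih _ _ x h
      · have : ((pvBotF L s2 (c :: cs) r).1 : List Int) = 0 :: (pvBotF L s2 cs r.tail).1 := by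
          simp only [pvBotF]
          rw [if_neg h2, if_neg (by tauto)]
        rw [this] at hx
        rcases List.mem_cons.mp hx with h | h
        · left; exact h
        · exact ih _ _ x h

-- ''.join(map(str, row)) for a 0/1 row is the row as characters
theorem pvJoinDigits (l : List Int) (h : ∀ x ∈ l, x = 0 ∨ x = 1) :
    (PySem.Str.join "" (l.map PySem.Int.toStr)).toList = l.map pvCh := by
  have : (PySem.Str.join "" (l.map PySem.Int.toStr)).toList
      = PySem.Chars.join [] ((l.map PySem.Int.toStr).map String.toList) := by
    simp [PySem.Str.toList_join]
  rw [this]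
  have hmap : (l.map PySem.Int.toStr).map String.toList = (l.map pvCh).map ([·]) := by
    simp only [List.map_map, List.map_inj_left]
    intro x hx
    rcases h x hx with h0 | h0 <;>
      simp [h0, Function.comp, PySem.Int.toList_toStr, pvCh] <;> decide
  rw [hmap, PySem.Chars.join_nil_singletons]

-- ===== VERDICT (by name: the statement is the Claim_ definition above) =====
theorem solution_spec : Claim_equal_solution := by
  intro U L C _
  unfold Spec_solution solution solution_alt
  by_cases hs : C.sum ≠ U + L
  · simp [hs]
  · simp only [hs, if_false]
    -- A's two passes
    have hA0 := pvRow0 U L C C 0 0 0 [] (List.replicate C.length 0) rfl rfl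
    have hA1 := pvRow1 U L C (pvTopF U 0 C).1 C 0 (pvTopF U 0 C).2 0 [] rfl rfl
    simp only [List.nil_append, List.drop_zero] at hA0 hA1
    have hrange : List.range C.length = List.range' 0 C.length := List.range_eq_range'
    have hfoldA : (List.range 2).foldl
        (fun st i => (List.range C.length).foldl (pvStepA U L C i) st)
        (List.replicate 2 (List.replicate C.length (0 : Int)), (0 : Int), (0 : Int))
        = ([(pvTopF U 0 C).1, (pvBotF L 0 C (pvTopF U 0 C).1).1],
           (pvTopF U 0 C).2, (pvBotF L 0 C (pvTopF U 0 C).1).2) := by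
      show (List.range C.length).foldl (pvStepA U L C 1)
          ((List.range C.length).foldl (pvStepA U L C 0)
            ([List.replicate C.length 0, List.replicate C.length 0], 0, 0)) = _
      rw [hrange, hA0, hA1]
    -- B's single pass
    obtain ⟨a, b, hB⟩ := pvFoldB U L C 0 0 [] []
    have hpair := pvPair_eq U L C 0 0
    apply String.toList_inj.mp
    rw [hfoldA, hB]
    simp only [List.nil_append]
    rw [PySem.Str.toList_join]
    simp only [List.map_cons, List.map_nil]
    rw [PySem.Chars.join_cons_cons, PySem.Chars.join_singleton]
    rw [pvJoinDigits _ (pvTop_digits U C 0), pvJoinDigits _ (pvBot_digits L C 0 (pvTopF U 0 C).1)]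
    rw [hpair.1, hpair.2]
    simp
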